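-- pv_equiv track=rewrite | github.com/rodinany/manuscript_clustering | typical_variants/typical_features.py | typical_features
-- ===== SOURCE A (Python) =====
-- import itertools
--
-- def typical_features(variants_percents):
--     features = []
--     for i in range(len(variants_percents)):
--         row = variants_percents[i]
--         for value in row:
--             if value:
--                 num_cluster = row[value].index(max(row[value]))
--                 rest_values = row[value][:num_cluster] + row[value][num_cluster + 1:]
--                 if max(row[value]) >= 80 and not [x for x in rest_values if x >= 80]:
--                     features.append((i, num_cluster))
--
--     features = sorted(features, key=lambda x: x[1])
--     clusters_features = {}
--     it = itertools.groupby(features, lambda x: x[1])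
--     for cluster, subiter in it:
--         clusters_features[cluster] = [unit[0] for unit in subiter]
--
--     return clusters_features
-- ===== SOURCE B (Python) =====
-- def typical_features(variants_percents):
--     # A feature qualifies iff exactly one of its per-cluster percentages reaches 80,
--     # and that entry's position is its cluster: scan each column once for positions
--     # >= 80 (no max/argmax, no slicing) and group row indices on the fly in a dict.
--     groups = {}
--     for i, row in enumerate(variants_percents):
--         for key in row:
--             if key:
--                 hits = [j for j, x in enumerate(row[key]) if x >= 80]
--                 if len(hits) == 1:
--                     groups.setdefault(hits[0], []).append(i)
--     return {c: groups[c] for c in sorted(groups)}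
-- ===== Notes on version B (the rewrite author's own statement) =====
-- stated objective: simpler
-- what changed: Drops the max/argmax-plus-rest-slice dominance test entirely (a column qualifies iff exactly one entry reaches 80, and that entry's position is the cluster: one threshold scan per column), and drops the sort+itertools.groupby phase in favour of on-the-fly dict accumulation with setdefault, sorting only the distinct cluster keys.
import Mathlib
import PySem

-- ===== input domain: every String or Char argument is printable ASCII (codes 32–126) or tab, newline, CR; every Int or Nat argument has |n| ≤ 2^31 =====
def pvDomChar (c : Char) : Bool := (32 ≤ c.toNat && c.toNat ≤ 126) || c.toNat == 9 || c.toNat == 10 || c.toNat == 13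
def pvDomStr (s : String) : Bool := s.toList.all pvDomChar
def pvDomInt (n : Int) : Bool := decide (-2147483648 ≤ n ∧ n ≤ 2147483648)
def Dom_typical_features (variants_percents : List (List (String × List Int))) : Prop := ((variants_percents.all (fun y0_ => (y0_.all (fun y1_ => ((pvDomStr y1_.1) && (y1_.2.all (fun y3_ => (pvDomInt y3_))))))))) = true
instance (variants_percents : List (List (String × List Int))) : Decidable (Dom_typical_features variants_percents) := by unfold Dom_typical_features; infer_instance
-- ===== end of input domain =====

-- B drops A's max/argmax+rest-slice test (a column qualifies iff exactly one entry reaches 80;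
-- that entry's position is the cluster) and A's sort+groupby (dict accumulation on the fly).


-- ===== PORT A =====
-- itertools.groupby over (i, cluster) pairs keyed by the second component: one output
-- group per maximal run of equal keys (exact port of the groupby consumption loop in A).
def pvGroupBySnd : List (Int × Int) → List (Int × List Int)
  | [] => []
  | (i, c) :: rest =>
      (c, i :: (rest.takeWhile (fun p => p.2 == c)).map (fun p => p.1)) ::
        pvGroupBySnd (rest.dropWhile (fun p => p.2 == c))
  termination_by l => l.length
  decreasing_by
    have := List.length_dropWhile_le (fun p : Int × Int => p.2 == c) rest
    simp; omega

def typical_features (variants_percents : List (List (String × List Int))) : List (Int × List Int) :=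
  let features : List (Int × Int) :=
    (PySem.List.pyRange 0 (PySem.List.len variants_percents) 1).foldl (fun acc i =>
      let row := PySem.List.pyGetD variants_percents i []
      row.foldl (fun acc2 kv =>
        if kv.1 ≠ "" then
          let col := (PySem.Dict.mk row).getD kv.1 []   -- row[value]
          match PySem.List.max? col (fun x => x) with
          | none => acc2        -- max([]) raises ValueError: excluded by Pre_
          | some m =>
            match PySem.List.index? col m with
            | none => acc2      -- unreachable: m ∈ col
            | some num_cluster =>
              let rest_values := PySem.List.slice col none (some (num_cluster : Int)) ++
                                 PySem.List.slice col (some ((num_cluster : Int) + 1)) none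
              if 80 ≤ m ∧ rest_values.filter (fun x => decide (80 ≤ x)) = [] then
                acc2 ++ [(i, (num_cluster : Int))]
              else acc2
        else acc2) acc) []
  let featuresS := PySem.List.sorted features (fun x => x.2) false
  ((pvGroupBySnd featuresS).foldl (fun d g => d.insert g.1 g.2) PySem.Dict.empty).items

-- ===== PORT B =====
def typical_features_alt (variants_percents : List (List (String × List Int))) : List (Int × List Int) :=
  let groups : PySem.Dict Int (List Int) :=
    (PySem.List.enumerate variants_percents).foldl (fun d ir =>
      ir.2.foldl (fun d2 kv =>
        if kv.1 ≠ "" then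
          -- hits = [j for j, x in enumerate(row[key]) if x >= 80]
          let hits := ((PySem.List.enumerate ((PySem.Dict.mk ir.2).getD kv.1 [])).filter
              (fun jx => decide (80 ≤ jx.2))).map Prod.fst
          match hits with
          | [j] => d2.modify j [] (fun l => l ++ [ir.1])   -- groups.setdefault(hits[0], []).append(i)
          | _ => d2
        else d2) d) PySem.Dict.empty
  ((PySem.List.sorted groups.keys (fun c => c) false).foldl
      (fun d c => d.insert c (groups.getD c [])) PySem.Dict.empty).items

-- ===== PRECONDITION & SPEC =====
-- Pre_ excludes exactly the inputs on which A raises ValueError: a row whose dict maps a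
-- non-empty key to an empty list (max of an empty sequence).
def Pre_typical_features (variants_percents : List (List (String × List Int))) : Prop :=
  ∀ row ∈ variants_percents, ∀ kv ∈ row, kv.1 ≠ "" → (PySem.Dict.mk row).getD kv.1 [] ≠ []
instance (variants_percents : List (List (String × List Int))) : Decidable (Pre_typical_features variants_percents) := by unfold Pre_typical_features; infer_instance

def pvWitness_typical_features : (List (List (String × List Int))) :=
  [[("a", [85, 10]), ("", [])], [("b", [90, 95])], [("c", [5])]]

def Spec_typical_features (variants_percents : List (List (String × List Int))) (out : List (Int × List Int)) : Prop := out = typical_features_alt variants_percents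
instance (variants_percents : List (List (String × List Int))) (out : List (Int × List Int)) : Decidable (Spec_typical_features variants_percents out) := by unfold Spec_typical_features; infer_instance

-- ===== CLAIM (what is proved, stated in full; the proofs are below) =====
def Claim_equal_typical_features : Prop := ∀ (variants_percents : List (List (String × List Int))), Dom_typical_features variants_percents → Pre_typical_features variants_percents → Spec_typical_features variants_percents (typical_features variants_percents)

-- ===== LEMMAS AND PROOFS =====

def pvSw (p : Int × Int) : Int × Int := (p.2, p.1)

-- positions (as Python ints) of the entries >= 80 of a column: B's hit-list
def pvHits (col : List Int) : List Int :=
  ((PySem.List.enumerate col).filter (fun jx => decide (80 ≤ jx.2))).map Prod.fst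

-- per-(i,row,key) contribution of A's inner loop
def pvGA (i : Int) (row : List (String × List Int)) (kv : String × List Int) : List (Int × Int) :=
  if kv.1 ≠ "" then
    let col := (PySem.Dict.mk row).getD kv.1 []
    match PySem.List.max? col (fun x => x) with
    | none => []
    | some m =>
      match PySem.List.index? col m with
      | none => []
      | some nc =>
        if 80 ≤ m ∧ (PySem.List.slice col none (some (nc : Int)) ++
            PySem.List.slice col (some ((nc : Int) + 1)) none).filter (fun x => decide (80 ≤ x)) = [] then
          [(i, (nc : Int))]
        else []
  else []

-- per-(i,row,key) contribution of B's inner loop, as the (cluster, row) pair it records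
def pvGB (i : Int) (row : List (String × List Int)) (kv : String × List Int) : List (Int × Int) :=
  if kv.1 ≠ "" then
    match pvHits ((PySem.Dict.mk row).getD kv.1 []) with
    | [j] => [(j, i)]
    | _ => []
  else []

-- the (cluster, row) pairs B records, in scan order
def pvPairs (vp : List (List (String × List Int))) : List (Int × Int) :=
  (PySem.List.pyRange 0 (PySem.List.len vp) 1).flatMap
    (fun i => (PySem.List.pyGetD vp i []).flatMap (pvGB i (PySem.List.pyGetD vp i [])))

lemma pv_foldl_flatMap {α β γ : Type} (l : List α) (g : α → List β) (f : γ → β → γ) (b : γ) :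
    (l.flatMap g).foldl f b = l.foldl (fun b a => (g a).foldl f b) b := by
  induction l generalizing b with
  | nil => rfl
  | cons x t ih => rw [List.flatMap_cons, List.foldl_append, List.foldl_cons, ih]

lemma pv_foldA_inner (i : Int) (row l : List (String × List Int)) (acc : List (Int × Int)) :
    l.foldl (fun acc2 kv =>
      if kv.1 ≠ "" then
        let col := (PySem.Dict.mk row).getD kv.1 []
        match PySem.List.max? col (fun x => x) with
        | none => acc2
        | some m =>
          match PySem.List.index? col m with
          | none => acc2
          | some num_cluster =>
            let rest_values := PySem.List.slice col none (some (num_cluster : Int)) ++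
                               PySem.List.slice col (some ((num_cluster : Int) + 1)) none
            if 80 ≤ m ∧ rest_values.filter (fun x => decide (80 ≤ x)) = [] then
              acc2 ++ [(i, (num_cluster : Int))]
            else acc2
      else acc2) acc = acc ++ l.flatMap (pvGA i row) := by
  induction l generalizing acc with
  | nil => simp
  | cons kv t ih =>
    rw [List.foldl_cons, ih]
    have hb : ∀ acc2 : List (Int × Int),
        (if kv.1 ≠ "" then
          let col := (PySem.Dict.mk row).getD kv.1 []
          match PySem.List.max? col (fun x => x) with
          | none => acc2
          | some m =>
            match PySem.List.index? col m with
            | none => acc2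
            | some num_cluster =>
              let rest_values := PySem.List.slice col none (some (num_cluster : Int)) ++
                                 PySem.List.slice col (some ((num_cluster : Int) + 1)) none
              if 80 ≤ m ∧ rest_values.filter (fun x => decide (80 ≤ x)) = [] then
                acc2 ++ [(i, (num_cluster : Int))]
              else acc2
        else acc2) = acc2 ++ pvGA i row kv := by
      intro acc2
      simp only [pvGA]
      split
      · cases hmax : PySem.List.max? ((PySem.Dict.mk row).getD kv.1 []) (fun x => x) with
        | none => simp [hmax]
        | some m =>
          simp only [hmax]
          cases hidx : PySem.List.index? ((PySem.Dict.mk row).getD kv.1 []) m with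
          | none => simp [hidx]
          | some nc => simp only [hidx]; split <;> simp
      · simp
    rw [hb, List.flatMap_cons, List.append_assoc]

-- B's inner loop over one row = folding its recorded pairs into the dict
lemma pv_foldB_inner (i : Int) (row l : List (String × List Int)) (d : PySem.Dict Int (List Int)) :
    l.foldl (fun d2 kv =>
      if kv.1 ≠ "" then
        let hits := ((PySem.List.enumerate ((PySem.Dict.mk row).getD kv.1 [])).filter
            (fun jx => decide (80 ≤ jx.2))).map Prod.fst
        match hits with
        | [j] => d2.modify j [] (fun l2 => l2 ++ [i])
        | _ => d2
      else d2) d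
    = (l.flatMap (pvGB i row)).foldl
        (fun d2 p => d2.modify p.1 [] (fun l2 => l2 ++ [p.2])) d := by
  induction l generalizing d with
  | nil => rfl
  | cons kv t ih =>
    rw [List.foldl_cons, ih, List.flatMap_cons, List.foldl_append]
    congr 1
    simp only [pvGB, pvHits]
    by_cases hk : kv.1 ≠ ""
    · simp only [if_pos hk]
      rcases hh : ((PySem.List.enumerate ((PySem.Dict.mk row).getD kv.1 [])).filter
          (fun jx => decide (80 ≤ jx.2))).map Prod.fst with _ | ⟨j, _ | ⟨k2, t2⟩⟩ <;> simp [hh]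
    · simp [hk]

-- a filter over a duplicate-free list whose unique hit is a: the filter is the singleton [a]
lemma pv_filter_eq_singleton {β : Type} (p : β → Bool) (l : List β) (hnd : l.Nodup)
    (a : β) (ha : a ∈ l) (hpa : p a = true) (hu : ∀ b ∈ l, p b = true → b = a) :
    l.filter p = [a] := by
  have hmem : a ∈ l.filter p := List.mem_filter.mpr ⟨ha, hpa⟩
  have hall : ∀ b ∈ l.filter p, b = a := fun b hb =>
    hu b (List.mem_filter.mp hb).1 (List.mem_filter.mp hb).2
  have hndf : (l.filter p).Nodup := hnd.filter p
  cases hf : l.filter p with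
  | nil => rw [hf] at hmem; cases hmem
  | cons b t =>
    rw [hf] at hall hndf
    have hb : b = a := hall b List.mem_cons_self
    cases t with
    | nil => rw [hb]
    | cons c t2 =>
      have hc : c = a := hall c (List.mem_cons_of_mem _ List.mem_cons_self)
      have hbn : b ∉ c :: t2 := (List.nodup_cons.mp hndf).1
      exact absurd (show b ∈ c :: t2 by simp [hb, hc]) hbn

lemma pv_mem_rest (col : List Int) (nc k : Nat) (hk : k < col.length) (hne : k ≠ nc) :
    col[k] ∈ col.take nc ++ col.drop (nc + 1) := by
  rcases Nat.lt_or_ge k nc with h | h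
  · apply List.mem_append_left
    have hlt : k < (col.take nc).length := by simp [List.length_take]; omega
    have he : (col.take nc)[k] = col[k] := by
      simp [List.getElem_take]
    rw [← he]; exact List.getElem_mem hlt
  · have h2 : nc < k := lt_of_le_of_ne h (Ne.symm hne)
    apply List.mem_append_right
    have hlt : k - nc - 1 < (col.drop (nc + 1)).length := by simp [List.length_drop]; omega
    have he : (col.drop (nc + 1))[k - nc - 1] = col[k] := by
      rw [List.getElem_drop]; congr 1; omega
    rw [← he]; exact List.getElem_mem hlt

-- A's dominance test holds iff B's hit-list is exactly the argmax position
lemma pv_hits_of_cond (col : List Int) (m : Int) (nc : Nat)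
    (hmax : PySem.List.max? col (fun x => x) = some m)
    (hidx : PySem.List.index? col m = some nc)
    (h80 : 80 ≤ m)
    (hnil : (col.take nc ++ col.drop (nc + 1)).filter (fun x => decide (80 ≤ x)) = []) :
    pvHits col = [(nc : Int)] := by
  obtain ⟨hk, hval, -⟩ := PySem.List.getElem_of_index?_eq_some hidx
  rw [List.filter_eq_nil_iff] at hnil
  have hflt : (PySem.List.enumerate col).filter (fun jx => decide (80 ≤ jx.2)) =
      [((nc : Int), m)] := by
    apply pv_filter_eq_singleton
    · exact (PySem.List.pairwise_lt_enumerate col 0).imp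
        (fun h heq => absurd (heq ▸ h) (lt_irrefl _))
    · rw [PySem.List.mem_enumerate_iff]
      exact ⟨nc, hk, by simp [hval]⟩
    · simpa using h80
    · rintro ⟨j, x⟩ hb hpb
      rw [PySem.List.mem_enumerate_iff] at hb
      obtain ⟨k, hk2, hbe⟩ := hb
      obtain ⟨hj, hx⟩ := Prod.mk.injEq .. ▸ hbe
      simp only [decide_eq_true_eq] at hpb
      by_cases hne : k = nc
      · subst hne; simp [hj, hx, hval]
      · exact absurd hpb (by
          have := hnil col[k] (pv_mem_rest col nc k hk2 hne)
          simp only [decide_eq_true_eq] at this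
          rw [hx]; omega)
  simp [pvHits, hflt]

lemma pv_cond_of_hits (col : List Int) (m : Int) (nc : Nat) (j : Int)
    (hmax : PySem.List.max? col (fun x => x) = some m)
    (hidx : PySem.List.index? col m = some nc)
    (hh : pvHits col = [j]) :
    j = (nc : Int) ∧ 80 ≤ m ∧
      (col.take nc ++ col.drop (nc + 1)).filter (fun x => decide (80 ≤ x)) = [] := by
  -- unpack: the filtered enumeration is a singleton [q] with q.1 = j
  obtain ⟨q, hq, hj⟩ : ∃ q, (PySem.List.enumerate col).filter
      (fun jx => decide (80 ≤ jx.2)) = [q] ∧ q.1 = j := by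
    simp only [pvHits] at hh
    cases hf : (PySem.List.enumerate col).filter (fun jx => decide (80 ≤ jx.2)) with
    | nil => rw [hf] at hh; simp at hh
    | cons q t =>
      rw [hf, List.map_cons] at hh
      obtain ⟨h1, h2⟩ := List.cons.injEq .. ▸ hh
      exact ⟨q, by rw [List.map_eq_nil_iff] at h2; rw [h2], h1⟩
  have hqmem : q ∈ PySem.List.enumerate col := (List.mem_filter.mp (hq ▸ List.mem_cons_self)).1
  have hqp : 80 ≤ q.2 := by
    have := (List.mem_filter.mp (hq ▸ List.mem_cons_self)).2
    simpa using this
  rw [PySem.List.mem_enumerate_iff] at hqmem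
  obtain ⟨k, hkl, hqe⟩ := hqmem
  -- uniqueness: every other position is < 80
  have huniq : ∀ k2, (hk2 : k2 < col.length) → k2 ≠ k → ¬ (80 ≤ col[k2]) := by
    intro k2 hk2 hne habs
    have hmem2 : ((0 : Int) + (k2 : Int), col[k2]) ∈ PySem.List.enumerate col := by
      rw [PySem.List.mem_enumerate_iff]; exact ⟨k2, hk2, rfl⟩
    have : ((0 : Int) + (k2 : Int), col[k2]) ∈
        (PySem.List.enumerate col).filter (fun jx => decide (80 ≤ jx.2)) :=
      List.mem_filter.mpr ⟨hmem2, by simpa using habs⟩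
    rw [hq] at this
    have := List.mem_singleton.mp this
    rw [hqe] at this
    have h1 : (0 : Int) + (k2 : Int) = 0 + (k : Int) := (Prod.mk.injEq .. ▸ this).1
    exact hne (by omega)
  have hq2 : q.2 = col[k] := by rw [hqe]
  have h80k : 80 ≤ col[k] := hq2 ▸ hqp
  -- the max is col[k]
  have hm : m = col[k] := by
    obtain ⟨km, hkml, hkm⟩ := List.getElem_of_mem (PySem.List.max?_mem hmax)
    rcases eq_or_ne km k with rfl | hne
    · exact hkm.symm
    · have hlt := huniq km hkml hne
      have hge : col[k] ≤ m := PySem.List.max?_isMax hmax col[k] (List.getElem_mem hkl)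
      omega
  obtain ⟨hncl, hncv, -⟩ := PySem.List.getElem_of_index?_eq_some hidx
  have hnck : nc = k := by
    by_contra hne
    have hu := huniq nc hncl hne
    rw [hncv, hm] at hu
    exact hu h80k
  subst hnck
  refine ⟨by rw [← hj, hqe]; simp, by omega, ?_⟩
  rw [List.filter_eq_nil_iff]
  intro a ha
  rcases List.mem_append.mp ha with hta | hda
  · obtain ⟨t, htl, hte⟩ := List.getElem_of_mem hta
    simp only [List.length_take, lt_min_iff] at htl
    have hgt : (col.take nc)[t]'(by simp [List.length_take]; omega) = col[t] := by
      simp [List.getElem_take]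
    rw [hgt] at hte
    have hu := huniq t (by omega) (by omega)
    simp only [decide_eq_true_eq]
    rw [← hte]; exact hu
  · obtain ⟨t, htl, hte⟩ := List.getElem_of_mem hda
    simp only [List.length_drop] at htl
    rw [List.getElem_drop] at hte
    have hu := huniq (nc + 1 + t) (by omega) (by omega)
    simp only [decide_eq_true_eq]
    rw [← hte]; exact hu

lemma pv_gA_eq (i : Int) (row : List (String × List Int)) (kv : String × List Int)
    (h : kv.1 ≠ "" → (PySem.Dict.mk row).getD kv.1 [] ≠ []) :
    pvGA i row kv = (pvGB i row kv).map pvSw := by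
  simp only [pvGA, pvGB]
  by_cases hk : kv.1 ≠ ""
  · simp only [if_pos hk]
    have hcol := h hk
    cases hmax : PySem.List.max? ((PySem.Dict.mk row).getD kv.1 []) (fun x => x) with
    | none => exact absurd ((PySem.List.max?_eq_none_iff _ _).mp hmax) hcol
    | some m =>
      cases hidx : PySem.List.index? ((PySem.Dict.mk row).getD kv.1 []) m with
      | none =>
        have hm := (PySem.List.index?_isSome_iff ((PySem.Dict.mk row).getD kv.1 []) m).mpr
          (PySem.List.max?_mem hmax)
        rw [hidx] at hm; simp at hm
      | some nc =>
        simp only [hmax, hidx]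
        rw [PySem.List.slice_to_natCast]
        have hcast : ((nc : Int) + 1) = ((nc + 1 : Nat) : Int) := by push_cast; ring
        rw [hcast, PySem.List.slice_from_natCast]
        by_cases hA : 80 ≤ m ∧ (((PySem.Dict.mk row).getD kv.1 []).take nc ++
            ((PySem.Dict.mk row).getD kv.1 []).drop (nc + 1)).filter (fun x => decide (80 ≤ x)) = []
        · rw [if_pos hA, pv_hits_of_cond _ m nc hmax hidx hA.1 hA.2]
          simp [pvSw]
        · rw [if_neg hA]
          rcases hh : pvHits ((PySem.Dict.mk row).getD kv.1 []) with _ | ⟨j, _ | ⟨k2, t2⟩⟩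
          · simp
          · obtain ⟨-, h1, h2⟩ := pv_cond_of_hits _ m nc j hmax hidx hh
            exact absurd ⟨h1, h2⟩ hA
          · simp
  · simp [hk]

-- A's feature list is B's pair list with components swapped
lemma pv_features_eq (vp : List (List (String × List Int))) (h : Pre_typical_features vp) :
    ((PySem.List.pyRange 0 (PySem.List.len vp) 1).foldl (fun acc i =>
        (PySem.List.pyGetD vp i []).foldl (fun acc2 kv =>
          if kv.1 ≠ "" then
            let col := (PySem.Dict.mk (PySem.List.pyGetD vp i [])).getD kv.1 []
            match PySem.List.max? col (fun x => x) with
            | none => acc2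
            | some m =>
              match PySem.List.index? col m with
              | none => acc2
              | some num_cluster =>
                let rest_values := PySem.List.slice col none (some (num_cluster : Int)) ++
                                   PySem.List.slice col (some ((num_cluster : Int) + 1)) none
                if 80 ≤ m ∧ rest_values.filter (fun x => decide (80 ≤ x)) = [] then
                  acc2 ++ [(i, (num_cluster : Int))]
                else acc2
          else acc2) acc) [])
    = (pvPairs vp).map pvSw := by
  have hA : ∀ idxs : List Int, ∀ acc : List (Int × Int),
      idxs.foldl (fun acc i =>
        (PySem.List.pyGetD vp i []).foldl (fun acc2 kv =>
          if kv.1 ≠ "" then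
            let col := (PySem.Dict.mk (PySem.List.pyGetD vp i [])).getD kv.1 []
            match PySem.List.max? col (fun x => x) with
            | none => acc2
            | some m =>
              match PySem.List.index? col m with
              | none => acc2
              | some num_cluster =>
                let rest_values := PySem.List.slice col none (some (num_cluster : Int)) ++
                                   PySem.List.slice col (some ((num_cluster : Int) + 1)) none
                if 80 ≤ m ∧ rest_values.filter (fun x => decide (80 ≤ x)) = [] then
                  acc2 ++ [(i, (num_cluster : Int))]
                else acc2
          else acc2) acc) acc
      = acc ++ idxs.flatMap (fun i => (PySem.List.pyGetD vp i []).flatMap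
          (pvGA i (PySem.List.pyGetD vp i []))) := by
    intro idxs
    induction idxs with
    | nil => intro acc; simp
    | cons i t ih =>
      intro acc
      rw [List.foldl_cons, ih, pv_foldA_inner i (PySem.List.pyGetD vp i []) (PySem.List.pyGetD vp i []) acc,
        List.flatMap_cons, List.append_assoc]
  rw [hA]
  simp only [List.nil_append, pvPairs, List.map_flatMap]
  apply List.flatMap_congr
  intro j hj
  apply List.flatMap_congr
  intro kv hkv
  have hjr : PySem.Raise.InRange vp.length j := by
    rw [PySem.List.mem_pyRange_one] at hj
    have : PySem.List.len vp = (vp.length : Int) := by simp [PySem.List.len_eq]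
    constructor <;> omega
  have hrow : PySem.List.pyGetD vp j [] ∈ vp := PySem.List.pyGetD_mem vp [] hjr
  exact pv_gA_eq j _ kv (h _ hrow kv hkv)

-- B's dict accumulation = folding the recorded pairs into the dict
lemma pv_groups_eq (vp : List (List (String × List Int))) :
    ((PySem.List.enumerate vp).foldl (fun d ir =>
      ir.2.foldl (fun d2 kv =>
        if kv.1 ≠ "" then
          let hits := ((PySem.List.enumerate ((PySem.Dict.mk ir.2).getD kv.1 [])).filter
              (fun jx => decide (80 ≤ jx.2))).map Prod.fst
          match hits with
          | [j] => d2.modify j [] (fun l => l ++ [ir.1])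
          | _ => d2
        else d2) d) PySem.Dict.empty)
    = (pvPairs vp).foldl (fun d p => d.modify p.1 [] (fun l => l ++ [p.2])) PySem.Dict.empty := by
  rw [PySem.List.enumerate_eq_map_pyRange vp [], List.foldl_map]
  rw [pvPairs, pv_foldl_flatMap]
  apply List.foldl_ext
  intro d j hj
  exact pv_foldB_inner j (PySem.List.pyGetD vp j []) (PySem.List.pyGetD vp j []) d

lemma pv_insertBy_cons_of_before {α : Type} (before : α → α → Bool) (x y : α) (ys : List α)
    (h : before x y = true) :
    PySem.List.insertBy before x (y :: ys) = x :: y :: ys := by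
  simp [PySem.List.insertBy, h]

lemma pv_insertBy_append_of_forall_not {α : Type} (before : α → α → Bool) (x : α)
    (block rest : List α) (h : ∀ q ∈ block, before x q = false) :
    PySem.List.insertBy before x (block ++ rest) = block ++ PySem.List.insertBy before x rest := by
  induction block with
  | nil => rfl
  | cons b bs ih =>
    have hb : before x b = false := h b List.mem_cons_self
    simp only [List.cons_append, PySem.List.insertBy, hb]
    simp only [Bool.false_eq_true, if_false]
    rw [ih (fun q hq => h q (List.mem_cons_of_mem _ hq))]

-- inserting an element into a flatMap of key-homogeneous blocks over strictly increasing keys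
lemma pv_insertBy_blocks (c : Int) (p : Int × Int) (hp : p.2 = c)
    (ks : List Int) (F : Int → List (Int × Int))
    (hks : ks.Pairwise (· < ·))
    (hF : ∀ c' ∈ ks, ∀ q ∈ F c', q.2 = c')
    (hFne : ∀ c' ∈ ks, F c' ≠ [])
    (hFout : c ∉ ks → F c = []) :
    PySem.List.insertBy (fun a b => decide (a.2 < b.2)) p (ks.flatMap F) =
      (if c ∈ ks then ks else ks.takeWhile (· < c) ++ c :: ks.dropWhile (· < c)).flatMap
        (fun c' => F c' ++ if c' == c then [p] else []) := by
  induction ks with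
  | nil =>
    have hFc := hFout (List.not_mem_nil)
    simp [PySem.List.insertBy, hFc]
  | cons k ks2 ih =>
    have hklt : ∀ b ∈ ks2, k < b := (List.pairwise_cons.mp hks).1
    have htail : ks2.Pairwise (· < ·) := (List.pairwise_cons.mp hks).2
    rcases lt_trichotomy c k with hck | hck | hck
    · -- c < k : p goes in front, c is a fresh first key
      have hc_not : c ∉ k :: ks2 := by
        intro hc
        rcases List.mem_cons.mp hc with rfl | hc2
        · omega
        · exact absurd (hklt c hc2) (by omega)
      obtain ⟨q0, qt, hFk⟩ := List.exists_cons_of_ne_nil (hFne k List.mem_cons_self)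
      have hq0 : q0.2 = k := hF k List.mem_cons_self q0 (hFk ▸ List.mem_cons_self)
      have hbef : (fun a b : Int × Int => decide (a.2 < b.2)) p q0 = true := by
        simp [hp, hq0, hck]
      rw [if_neg hc_not, List.flatMap_cons, hFk, List.cons_append,
        pv_insertBy_cons_of_before _ _ _ _ hbef]
      have htw : List.takeWhile (fun x => decide (x < c)) (k :: ks2) = [] :=
        List.takeWhile_cons_of_neg (by simp; omega)
      have hdw : List.dropWhile (fun x => decide (x < c)) (k :: ks2) = k :: ks2 :=
        List.dropWhile_cons_of_neg (by simp; omega)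
      show _ = List.flatMap _ ((k :: ks2).takeWhile (fun x => decide (x < c)) ++
        c :: (k :: ks2).dropWhile (fun x => decide (x < c)))
      rw [htw, hdw, List.nil_append, List.flatMap_cons]
      have hFc : F c = [] := hFout hc_not
      have hrest : List.flatMap (fun c' => F c' ++ if c' == c then [p] else []) (k :: ks2) =
          List.flatMap F (k :: ks2) := by
        apply List.flatMap_congr
        intro c' hc'
        have : (c' == c) = false := by
          apply beq_false_of_ne
          intro rfl_eq
          exact hc_not (rfl_eq ▸ hc')
        simp [this]
      rw [hrest, hFc, List.flatMap_cons, hFk]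
      simp
    · -- c = k : p is appended to k's block
      subst hck
      have hblock : ∀ q ∈ F c, (fun a b : Int × Int => decide (a.2 < b.2)) p q = false := by
        intro q hq
        have := hF c List.mem_cons_self q hq
        simp [hp, this]
      rw [List.flatMap_cons, pv_insertBy_append_of_forall_not _ _ _ _ hblock]
      have hins : PySem.List.insertBy (fun a b => decide (a.2 < b.2)) p (List.flatMap F ks2) =
          p :: List.flatMap F ks2 := by
        cases hfm : List.flatMap F ks2 with
        | nil => simp [PySem.List.insertBy]
        | cons r rs =>
          have hr : r ∈ List.flatMap F ks2 := by rw [hfm]; exact List.mem_cons_self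
          obtain ⟨c', hc', hrF⟩ := List.mem_flatMap.mp hr
          have hr2 : r.2 = c' := hF c' (List.mem_cons_of_mem _ hc') r hrF
          have : (fun a b : Int × Int => decide (a.2 < b.2)) p r = true := by
            have := hklt c' hc'
            simp [hp, hr2]
            omega
          rw [pv_insertBy_cons_of_before _ _ _ _ this]
      rw [hins, if_pos List.mem_cons_self, List.flatMap_cons]
      have hrest : List.flatMap (fun c' => F c' ++ if c' == c then [p] else []) ks2 =
          List.flatMap F ks2 := by
        apply List.flatMap_congr
        intro c' hc'
        have : (c' == c) = false := by
          apply beq_false_of_ne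
          intro rfl_eq
          exact absurd (hklt c' hc') (by rw [rfl_eq]; omega)
        simp [this]
      rw [hrest]
      simp
    · -- k < c : walk past k's block and recurse
      have hblock : ∀ q ∈ F k, (fun a b : Int × Int => decide (a.2 < b.2)) p q = false := by
        intro q hq
        have := hF k List.mem_cons_self q hq
        simp [hp, this]
        omega
      rw [List.flatMap_cons, pv_insertBy_append_of_forall_not _ _ _ _ hblock]
      have hkc : (k == c) = false := beq_false_of_ne (by omega)
      have hrec := ih htail
        (fun c' hc' => hF c' (List.mem_cons_of_mem _ hc'))
        (fun c' hc' => hFne c' (List.mem_cons_of_mem _ hc'))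
        (fun hc2 => hFout (by
          intro hc
          rcases List.mem_cons.mp hc with rfl | hc3
          · omega
          · exact hc2 hc3))
      rw [hrec]
      by_cases hcin : c ∈ ks2
      · rw [if_pos hcin, if_pos (List.mem_cons_of_mem _ hcin), List.flatMap_cons]
        simp [hkc]
      · rw [if_neg hcin, if_neg (by
          intro hc
          rcases List.mem_cons.mp hc with rfl | hc3
          · omega
          · exact hcin hc3)]
        have htw : List.takeWhile (fun x => decide (x < c)) (k :: ks2) =
            k :: List.takeWhile (fun x => decide (x < c)) ks2 :=
          List.takeWhile_cons_of_pos (by simp; omega)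
        have hdw : List.dropWhile (fun x => decide (x < c)) (k :: ks2) =
            List.dropWhile (fun x => decide (x < c)) ks2 :=
          List.dropWhile_cons_of_pos (by simp; omega)
        show _ = List.flatMap _ ((k :: ks2).takeWhile (fun x => decide (x < c)) ++
          c :: (k :: ks2).dropWhile (fun x => decide (x < c)))
        rw [htw, hdw, List.cons_append, List.flatMap_cons]
        simp [hkc]

lemma pv_dedup_append_singleton (l : List Int) (c : Int) :
    PySem.List.dedup (l ++ [c]) =
      if c ∈ l then PySem.List.dedup l else PySem.List.dedup l ++ [c] := by
  have h1 : PySem.List.dedup (l ++ [c]) = PySem.Set.add (PySem.List.dedup l) c := by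
    simp [PySem.List.dedup, PySem.Set.ofList, List.foldl_append]
  rw [h1]
  simp only [PySem.Set.add]
  have h2 : (PySem.Set.contains (PySem.List.dedup l) c = true) ↔ c ∈ l := by
    simp [PySem.Set.contains]
  by_cases hc : c ∈ l
  · rw [if_pos (h2.mpr hc), if_pos hc]
  · rw [if_neg (fun hx => hc (h2.mp hx)), if_neg hc]

-- the stable sort by second component is the concatenation of the filter-blocks,
-- taken over the distinct keys in ascending order
lemma pv_sorted_snd_flatMap (qs : List (Int × Int)) :
    PySem.List.sorted qs (fun p => p.2) false =
      (PySem.List.sorted (PySem.List.dedup (qs.map (fun p => p.2))) (fun c => c) false).flatMap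
        (fun c => qs.filter (fun p => p.2 == c)) := by
  induction qs using List.reverseRecOn with
  | nil => rfl
  | append_singleton qs p ih =>
    have hks_pw : (PySem.List.sorted (PySem.List.dedup (qs.map (fun p => p.2)))
        (fun c => c) false).Pairwise (· < ·) := by
      rw [PySem.List.dedup_eq_ofList]
      exact PySem.List.sorted_ofList_pairwise_lt _
    have hmemks : ∀ c', c' ∈ PySem.List.sorted (PySem.List.dedup (qs.map (fun p => p.2)))
        (fun c => c) false ↔ ∃ q ∈ qs, q.2 = c' := by
      intro c'
      rw [PySem.List.mem_sorted, PySem.List.mem_dedup, List.mem_map]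
    have hstep : PySem.List.sorted (qs ++ [p]) (fun x => x.2) false =
        PySem.List.insertBy (fun a b => decide (a.2 < b.2)) p
          (PySem.List.sorted qs (fun x => x.2) false) := by
      rw [PySem.List.sorted_eq_foldl_insertBy, PySem.List.sorted_eq_foldl_insertBy,
        List.foldl_append, List.foldl_cons, List.foldl_nil]
    rw [hstep, ih]
    rw [pv_insertBy_blocks p.2 p rfl _ _ hks_pw
      (by intro c' _ q hq; exact beq_iff_eq.mp (List.mem_filter.mp hq).2)
      (by
        intro c' hc'
        obtain ⟨q, hq, hq2⟩ := (hmemks c').mp hc'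
        intro hnil
        rw [List.filter_eq_nil_iff] at hnil
        exact hnil q hq (by simp [hq2]))
      (by
        intro hc
        rw [List.filter_eq_nil_iff]
        intro q hq
        simp only [beq_iff_eq]
        intro hq2
        exact hc ((hmemks p.2).mpr ⟨q, hq, hq2⟩))]
    have hFilt : (fun c => (qs ++ [p]).filter (fun p' => p'.2 == c)) =
        (fun c' => qs.filter (fun p' => p'.2 == c') ++ if c' == p.2 then [p] else []) := by
      funext c'
      rw [List.filter_append]
      congr 1
      by_cases hc : p.2 = c'
      · subst hc; simp
      · have h1 : (p.2 == c') = false := beq_false_of_ne hc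
        have h2 : (c' == p.2) = false := beq_false_of_ne (Ne.symm hc)
        simp [h1, h2]
    rw [hFilt]
    congr 1
    -- remaining: the key lists agree
    rw [List.map_append, List.map_cons, List.map_nil, pv_dedup_append_singleton]
    by_cases hc : p.2 ∈ qs.map (fun p => p.2)
    · rw [if_pos hc, if_pos (by
        obtain ⟨q, hq, hq2⟩ := List.mem_map.mp hc
        exact (hmemks p.2).mpr ⟨q, hq, hq2⟩)]
    · have hcks : p.2 ∉ PySem.List.sorted (PySem.List.dedup (qs.map (fun p => p.2)))
          (fun c => c) false := by
        intro hmem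
        obtain ⟨q, hq, hq2⟩ := (hmemks p.2).mp hmem
        exact hc (List.mem_map.mpr ⟨q, hq, hq2⟩)
      rw [if_neg hc, if_neg hcks]
      set ks := PySem.List.sorted (PySem.List.dedup (qs.map (fun p => p.2))) (fun c => c) false with hksdef
      have hsplit : ks.takeWhile (· < p.2) ++ ks.dropWhile (· < p.2) = ks :=
        List.takeWhile_append_dropWhile
      have hpw2 : (ks.takeWhile (· < p.2) ++ ks.dropWhile (· < p.2)).Pairwise (· < ·) := by
        rw [hsplit]; exact hks_pw
      rw [List.pairwise_append] at hpw2
      have hdwgt : ∀ x ∈ ks.dropWhile (· < p.2), p.2 < x := by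
        intro x hx
        cases hdw : ks.dropWhile (· < p.2) with
        | nil => rw [hdw] at hx; exact absurd hx (List.not_mem_nil)
        | cons h t =>
          have hhead : ¬ (decide (h < p.2) = true) := by
            have := List.head?_dropWhile_not (p := fun x => decide (x < p.2)) (l := ks)
            rw [hdw] at this
            simpa using this
          simp only [decide_eq_true_eq] at hhead
          have hne : h ≠ p.2 := by
            intro heq
            apply hcks
            rw [← heq]
            have : h ∈ ks.dropWhile (· < p.2) := by rw [hdw]; exact List.mem_cons_self
            exact (List.dropWhile_sublist _).subset this
          have hhgt : p.2 < h := by omega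
          rw [hdw] at hx
          rcases List.mem_cons.mp hx with rfl | hxt
          · exact hhgt
          · have hpwdw : (ks.dropWhile (· < p.2)).Pairwise (· < ·) := hpw2.2.1
            rw [hdw] at hpwdw
            have := (List.pairwise_cons.mp hpwdw).1 x hxt
            omega
      refine (PySem.List.sorted_eq_of_perm_of_pairwise_lt _ _ _ ?_ ?_).symm
      · have hperm1 : (ks.takeWhile (· < p.2) ++ p.2 :: ks.dropWhile (· < p.2)).Perm
            (p.2 :: ks) := by
          have h := List.perm_middle (a := p.2) (l₁ := ks.takeWhile (· < p.2))
            (l₂ := ks.dropWhile (· < p.2))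
          rwa [hsplit] at h
        have hperm2 : (p.2 :: ks).Perm (PySem.List.dedup (qs.map (fun p => p.2)) ++ [p.2]) :=
          ((PySem.List.sorted_perm _ _ _).cons p.2).trans (List.perm_append_singleton _ _).symm
        exact hperm1.trans hperm2
      · rw [List.pairwise_append]
        refine ⟨hpw2.1, ?_, ?_⟩
        · rw [List.pairwise_cons]
          exact ⟨hdwgt, hpw2.2.1⟩
        · intro a ha b hb
          have halt : (fun x => decide (x < p.2)) a = true :=
            List.mem_takeWhile_imp (p := fun x => decide (x < p.2)) ha
          simp only [decide_eq_true_eq] at halt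
          rcases List.mem_cons.mp hb with rfl | hbd
          · exact halt
          · have := hdwgt b hbd
            omega

-- groupby over a flatMap of nonempty key-homogeneous blocks with strictly increasing keys
lemma pv_group_flatMap (ks : List Int) (F : Int → List (Int × Int))
    (hks : ks.Pairwise (· < ·))
    (hF : ∀ c' ∈ ks, ∀ q ∈ F c', q.2 = c')
    (hFne : ∀ c' ∈ ks, F c' ≠ []) :
    pvGroupBySnd (ks.flatMap F) = ks.map (fun c => (c, (F c).map (fun p => p.1))) := by
  induction ks with
  | nil => simp [pvGroupBySnd]
  | cons k ks2 ih =>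
    have hklt : ∀ b ∈ ks2, k < b := (List.pairwise_cons.mp hks).1
    have htail : ks2.Pairwise (· < ·) := (List.pairwise_cons.mp hks).2
    obtain ⟨q0, qt, hFk⟩ := List.exists_cons_of_ne_nil (hFne k List.mem_cons_self)
    obtain ⟨i0, c0⟩ := q0
    have hc0 : c0 = k := hF k List.mem_cons_self (i0, c0) (hFk ▸ List.mem_cons_self)
    subst hc0
    have hqt : ∀ q ∈ qt, q.2 = c0 := fun q hq =>
      hF c0 List.mem_cons_self q (hFk ▸ List.mem_cons_of_mem _ hq)
    have hrest : ∀ q ∈ ks2.flatMap F, (q.2 == c0) = false := by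
      intro q hq
      obtain ⟨c', hc', hqF⟩ := List.mem_flatMap.mp hq
      have hq2 : q.2 = c' := hF c' (List.mem_cons_of_mem _ hc') q hqF
      apply beq_false_of_ne
      have := hklt c' hc'
      omega
    rw [List.flatMap_cons, hFk, List.cons_append]
    rw [pvGroupBySnd]
    have htwqt : qt.takeWhile (fun p => p.2 == c0) = qt :=
      List.takeWhile_eq_self_iff.mpr (fun q hq => by simp [hqt q hq])
    have hdwqt : qt.dropWhile (fun p => p.2 == c0) = [] :=
      List.dropWhile_eq_nil_iff.mpr (fun q hq => by simp [hqt q hq])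
    have htwrest : (ks2.flatMap F).takeWhile (fun p => p.2 == c0) = [] := by
      cases hr : ks2.flatMap F with
      | nil => rfl
      | cons r rs =>
        apply List.takeWhile_cons_of_neg
        have := hrest r (hr ▸ List.mem_cons_self)
        simp [this]
    have hdwrest : (ks2.flatMap F).dropWhile (fun p => p.2 == c0) = ks2.flatMap F := by
      cases hr : ks2.flatMap F with
      | nil => rfl
      | cons r rs =>
        apply List.dropWhile_cons_of_neg
        have := hrest r (hr ▸ List.mem_cons_self)
        simp [this]
    rw [List.takeWhile_append, htwqt, if_pos rfl, htwrest, List.append_nil]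
    rw [List.dropWhile_append, hdwqt]
    simp only [List.isEmpty_nil, if_true]
    rw [hdwrest]
    rw [ih htail (fun c' hc' => hF c' (List.mem_cons_of_mem _ hc'))
      (fun c' hc' => hFne c' (List.mem_cons_of_mem _ hc'))]
    rw [List.map_cons, hFk, List.map_cons]

-- the grouping tails of the two ports agree as a function of B's pair list
lemma pv_tails_eq (pairs : List (Int × Int)) :
    ((pvGroupBySnd (PySem.List.sorted (pairs.map pvSw) (fun x => x.2) false)).foldl
        (fun d g => d.insert g.1 g.2) PySem.Dict.empty).items =
    ((PySem.List.sorted (pairs.foldl (fun d p => d.modify p.1 [] (fun l => l ++ [p.2]))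
          PySem.Dict.empty).keys (fun c => c) false).foldl
        (fun d c => d.insert c ((pairs.foldl (fun d p => d.modify p.1 [] (fun l => l ++ [p.2]))
          PySem.Dict.empty).getD c [])) PySem.Dict.empty).items := by
  have hmapsnd : (pairs.map pvSw).map (fun p : Int × Int => p.2) =
      pairs.map (fun p : Int × Int => p.1) := by
    rw [List.map_map]; rfl
  have hpwks : (PySem.List.sorted (PySem.List.dedup (pairs.map (fun p : Int × Int => p.1)))
      (fun c => c) false).Pairwise (· < ·) := by
    rw [PySem.List.dedup_eq_ofList]
    exact PySem.List.sorted_ofList_pairwise_lt _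
  have hndks : (PySem.List.sorted (PySem.List.dedup (pairs.map (fun p : Int × Int => p.1)))
      (fun c => c) false).Nodup := hpwks.imp (fun h => ne_of_lt h)
  have hmemks : ∀ c, c ∈ PySem.List.sorted (PySem.List.dedup (pairs.map (fun p : Int × Int => p.1)))
      (fun c => c) false ↔ ∃ q ∈ pairs, q.1 = c := by
    intro c
    rw [PySem.List.mem_sorted, PySem.List.mem_dedup, List.mem_map]
  -- left side: sort + groupby + dict-build
  rw [pv_sorted_snd_flatMap, hmapsnd]
  rw [pv_group_flatMap _ _ hpwks
    (by intro c' _ q hq; exact beq_iff_eq.mp (List.mem_filter.mp hq).2)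
    (by
      intro c' hc'
      obtain ⟨q, hq, hq1⟩ := (hmemks c').mp hc'
      intro hnil
      rw [List.filter_eq_nil_iff] at hnil
      exact hnil (pvSw q) (List.mem_map_of_mem hq) (by simp [pvSw, hq1]))]
  have hLitems : (List.foldl (fun (d : PySem.Dict Int (List Int)) (g : Int × List Int) => d.insert g.1 g.2)
        PySem.Dict.empty
        ((PySem.List.sorted (PySem.List.dedup (pairs.map (fun p : Int × Int => p.1)))
          (fun c => c) false).map (fun c => (c, ((pairs.map pvSw).filter
            (fun p => p.2 == c)).map (fun p => p.1))))).items = PySem.Dict.empty.items ++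
        ((PySem.List.sorted (PySem.List.dedup (pairs.map (fun p : Int × Int => p.1)))
          (fun c => c) false).map (fun c => (c, ((pairs.map pvSw).filter
            (fun p => p.2 == c)).map (fun p => p.1)))).map (fun g => (g.1, g.2)) :=
    PySem.Dict.items_foldl_insert_fresh
      ((PySem.List.sorted (PySem.List.dedup (pairs.map (fun p : Int × Int => p.1)))
        (fun c => c) false).map (fun c => (c, ((pairs.map pvSw).filter
          (fun p => p.2 == c)).map (fun p => p.1))))
      (fun g => g.1) (fun g => g.2) PySem.Dict.empty
      (fun a _ => PySem.Dict.contains_empty _)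
      (by
        rw [List.map_map]
        have : ((fun g : Int × List Int => g.1) ∘ (fun c => (c, (((pairs.map pvSw).filter
            (fun p => p.2 == c)).map (fun p => p.1))))) = id := rfl
        rw [this, List.map_id]
        exact hndks)
  rw [hLitems]
  -- right side: dict accumulation + sorted keys
  have hkeys : (pairs.foldl (fun d p => d.modify p.1 [] (fun l => l ++ [p.2]))
      PySem.Dict.empty).keys = PySem.List.dedup (pairs.map (fun p : Int × Int => p.1)) := by
    rw [PySem.Dict.keys_foldl_modify_key pairs (fun p : Int × Int => p.1) []
      (fun _ p => fun l => l ++ [p.2]) PySem.Dict.empty]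
    rw [PySem.Dict.keys_empty, PySem.List.dedup_eq_ofList]
    rfl
  rw [hkeys]
  have hRitems : ((PySem.List.sorted (PySem.List.dedup (pairs.map (fun p : Int × Int => p.1)))
          (fun c => c) false).foldl
        (fun d c => d.insert c ((pairs.foldl (fun d p => d.modify p.1 [] (fun l => l ++ [p.2]))
          PySem.Dict.empty).getD c [])) PySem.Dict.empty).items
      = PySem.Dict.empty.items ++
        (PySem.List.sorted (PySem.List.dedup (pairs.map (fun p : Int × Int => p.1)))
          (fun c => c) false).map (fun c => (c, (pairs.foldl
            (fun d p => d.modify p.1 [] (fun l => l ++ [p.2]))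
            PySem.Dict.empty).getD c [])) :=
    PySem.Dict.items_foldl_insert_fresh
      (PySem.List.sorted (PySem.List.dedup (pairs.map (fun p : Int × Int => p.1)))
        (fun c => c) false)
      (fun c => c)
      (fun c => (pairs.foldl (fun d p => d.modify p.1 [] (fun l => l ++ [p.2]))
        PySem.Dict.empty).getD c []) PySem.Dict.empty
      (fun a _ => PySem.Dict.contains_empty _)
      (by rw [List.map_id']; exact hndks)
  rw [hRitems]
  congr 1
  rw [List.map_map]
  apply List.map_congr_left
  intro c hc
  simp only [Function.comp_apply]
  rw [PySem.Dict.getD_foldl_modify_append pairs PySem.Dict.empty c,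
    PySem.Dict.getD_empty, List.nil_append]
  have hflt : (pairs.map pvSw).filter (fun p => p.2 == c) =
      (pairs.filter (fun p => p.1 == c)).map pvSw := by
    rw [List.filter_map]
    rfl
  rw [hflt, List.map_map]
  rfl

-- ===== VERDICT (by name: the statement is the Claim_ definition above) =====
theorem typical_features_spec : Claim_equal_typical_features := by
  intro vp _ hpre
  unfold Spec_typical_features typical_features typical_features_alt
  rw [pv_features_eq vp hpre, pv_groups_eq, pv_tails_eq]
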